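-- pv_equiv track=rewrite | github.com/pedramaghazadeh/CSE258-Web-Mining-and-Recommender-Systems | HW3/homework3.py | baseLineStrategy
-- ===== SOURCE A (Python) =====
-- def baseLineStrategy(mostPopular, totalRead):
--     # Compute the set of items for which we should return "True"
--     # This is the same strategy implemented in the baseline code for Assignment 1
--     return1 = set()
--     count = 0
--     for ic, i in mostPopular:
--         count += ic
--         return1.add(i)
--         if count > totalRead/2: break
--     return return1
-- ===== SOURCE B (Python) =====
-- def baseLineStrategy(mostPopular, totalRead):
--     # Two-pass decomposition: build parallel item and cumulative-count lists,
--     # then scan for the first index where the cumulative count crosses half.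
--     items = [i for _, i in mostPopular]
--     cums = []
--     s = 0
--     for ic, _ in mostPopular:
--         s += ic
--         cums.append(s)
--     for k, c in enumerate(cums):
--         if c > totalRead / 2:
--             return set(items[:k + 1])
--     return set(items)
-- ===== Notes on version B (the rewrite author's own statement) =====
-- stated objective: alternative
-- what changed: Replaces A's single fused loop (set built while accumulating, with break) by two passes: precompute the cumulative-count list, linearly find the first index crossing totalRead/2, then build the set from a prefix slice of the items list.
import Mathlib
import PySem

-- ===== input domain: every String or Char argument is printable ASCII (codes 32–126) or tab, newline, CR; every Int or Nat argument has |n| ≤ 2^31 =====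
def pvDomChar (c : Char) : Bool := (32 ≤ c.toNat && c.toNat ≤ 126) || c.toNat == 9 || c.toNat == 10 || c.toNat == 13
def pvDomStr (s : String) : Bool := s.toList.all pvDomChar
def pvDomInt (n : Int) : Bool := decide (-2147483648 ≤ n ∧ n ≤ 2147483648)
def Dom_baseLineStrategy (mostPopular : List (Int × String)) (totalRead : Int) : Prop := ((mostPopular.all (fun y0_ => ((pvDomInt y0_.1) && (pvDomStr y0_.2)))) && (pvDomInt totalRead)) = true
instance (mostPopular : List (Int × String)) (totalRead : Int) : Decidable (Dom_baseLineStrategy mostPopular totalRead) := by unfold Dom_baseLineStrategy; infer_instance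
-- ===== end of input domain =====

-- B replaces A's fused accumulate-and-add loop by two passes (cumulative-count list,
-- then a prefix-slice set build); same O(n) cost, alternative decomposition.
-- The Python test 'count > totalRead/2' (float division) is ported as '2*count > totalRead',
-- exact for the integers of the stated domain.

-- ===== PORT A =====
-- A's loop: running count, set built with .add, break when count > totalRead/2.
def baseLineStrategyLoop (totalRead : Int) : List (Int × String) → PySem.Set String → Int → List String
  | [], return1, _ => return1
  | (ic, i) :: rest, return1, count =>
    let count' := count + ic
    let return1' := PySem.Set.add return1 i
    if 2 * count' > totalRead then return1'
    else baseLineStrategyLoop totalRead rest return1' count'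

def baseLineStrategy (mostPopular : List (Int × String)) (totalRead : Int) : List String :=
  baseLineStrategyLoop totalRead mostPopular PySem.Set.empty 0

-- ===== PORT B =====
-- cumulative-count list (B's first loop)
def bCums : List (Int × String) → Int → List Int
  | [], _ => []
  | (ic, _) :: rest, s => (s + ic) :: bCums rest (s + ic)

-- B's second loop: first index k with cums[k] > totalRead/2
def bFindK (totalRead : Int) : List Int → Nat → Option Nat
  | [], _ => none
  | c :: rest, k => if 2 * c > totalRead then some k else bFindK totalRead rest (k + 1)

def baseLineStrategy_alt (mostPopular : List (Int × String)) (totalRead : Int) : List String :=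
  let items := mostPopular.map Prod.snd
  let cums := bCums mostPopular 0
  match bFindK totalRead cums 0 with
  | some k => PySem.Set.ofList (items.take (k + 1))
  | none => PySem.Set.ofList items

-- ===== PRECONDITION & SPEC =====
def Spec_baseLineStrategy (mostPopular : List (Int × String)) (totalRead : Int) (out : List String) : Prop := out = baseLineStrategy_alt mostPopular totalRead
instance (mostPopular : List (Int × String)) (totalRead : Int) (out : List String) : Decidable (Spec_baseLineStrategy mostPopular totalRead out) := by unfold Spec_baseLineStrategy; infer_instance

-- ===== CLAIM (what is proved, stated in full; the proofs are below) =====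
def Claim_equal_baseLineStrategy : Prop := ∀ (mostPopular : List (Int × String)) (totalRead : Int), Dom_baseLineStrategy mostPopular totalRead → Spec_baseLineStrategy mostPopular totalRead (baseLineStrategy mostPopular totalRead)

-- ===== LEMMAS AND PROOFS =====

theorem bFindK_shift (t : Int) (l : List Int) (k : Nat) :
    bFindK t l k = (bFindK t l 0).map (· + k) := by
  induction l generalizing k with
  | nil => simp [bFindK]
  | cons c rest ih =>
    simp only [bFindK]
    split_ifs with h
    · simp
    · rw [ih (k + 1), ih 1, Option.map_map]
      cases bFindK t rest 0 with
      | none => simp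
      | some k => simp; omega

theorem ofList_append_singleton {α : Type} [BEq α] (pre : List α) (x : α) :
    PySem.Set.add (PySem.Set.ofList pre) x = PySem.Set.ofList (pre ++ [x]) := by
  simp [PySem.Set.ofList_eq_foldl]

theorem loop_eq_alt (t : Int) (mp : List (Int × String)) (c : Int) (pre : List String) :
    baseLineStrategyLoop t mp (PySem.Set.ofList pre) c =
      (match bFindK t (bCums mp c) 0 with
       | some k => PySem.Set.ofList (pre ++ (mp.map Prod.snd).take (k + 1))
       | none => PySem.Set.ofList (pre ++ mp.map Prod.snd)) := by
  induction mp generalizing c pre with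
  | nil => simp [baseLineStrategyLoop, bCums, bFindK]
  | cons hd rest ih =>
    obtain ⟨ic, i⟩ := hd
    simp only [baseLineStrategyLoop, bCums, bFindK, List.map_cons]
    split_ifs with h
    · simp [ofList_append_singleton]
    · rw [ofList_append_singleton, ih (c + ic) (pre ++ [i]),
        bFindK_shift t (bCums rest (c + ic)) 1]
      cases bFindK t (bCums rest (c + ic)) 0 with
      | none => simp
      | some k => simp [List.take_succ_cons]

-- ===== VERDICT (by name: the statement is the Claim_ definition above) =====
theorem baseLineStrategy_spec : Claim_equal_baseLineStrategy := by
  intro mp t _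
  unfold Spec_baseLineStrategy baseLineStrategy baseLineStrategy_alt
  have := loop_eq_alt t mp 0 []
  simpa [PySem.Set.empty] using this
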